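-- pv_equiv track=rewrite | github.com/leongershko/Nand2Tetris | Project06/Parser.py | remove_com_space
-- ===== SOURCE A (Python) =====
-- def remove_com_space(f):
--     inp_lines_as_list = [line.rstrip('\n') for line in f]
--     input_lines_no_space = [line.replace(' ', "") for line in inp_lines_as_list]
--
--     new_lst = input_lines_no_space.copy()
--     for i, val in enumerate(input_lines_no_space):
--         if val[:2] == "//":
--             new_lst[i] = ""
--
--         elif "//" in val:
--             ind = val.find("//")
--             new_val = val[:ind]
--             new_lst[i] = new_val
--     # Remove the new lines in the Array
--     new_lst = [val for val in new_lst if val != ""]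
--
--     return new_lst
-- ===== SOURCE B (Python) =====
-- def remove_com_space(f):
--     out = []
--     for line in f:
--         buf = []
--         pending = False
--         cut = False
--         for c in line.rstrip('\n'):
--             if c == ' ':
--                 continue
--             if c == '/':
--                 if pending:
--                     cut = True
--                     break
--                 pending = True
--             else:
--                 if pending:
--                     buf.append('/')
--                     pending = False
--                 buf.append(c)
--         if pending and not cut:
--             buf.append('/')
--         if buf:
--             out.append(''.join(buf))
--     return out
-- ===== Notes on version B (the rewrite author's own statement) =====
-- stated objective: alternative
-- what changed: B replaces A's staged whole-string passes (rstrip list, space-replace list, find/slice comment cut, empty filter) by a per-line character-level state machine: a single scan over each line's characters that skips spaces on the fly, carries a pending-slash flag, and breaks the moment a second slash completes a '//' comment marker, emitting the line only if anything was kept.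
import Mathlib
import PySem

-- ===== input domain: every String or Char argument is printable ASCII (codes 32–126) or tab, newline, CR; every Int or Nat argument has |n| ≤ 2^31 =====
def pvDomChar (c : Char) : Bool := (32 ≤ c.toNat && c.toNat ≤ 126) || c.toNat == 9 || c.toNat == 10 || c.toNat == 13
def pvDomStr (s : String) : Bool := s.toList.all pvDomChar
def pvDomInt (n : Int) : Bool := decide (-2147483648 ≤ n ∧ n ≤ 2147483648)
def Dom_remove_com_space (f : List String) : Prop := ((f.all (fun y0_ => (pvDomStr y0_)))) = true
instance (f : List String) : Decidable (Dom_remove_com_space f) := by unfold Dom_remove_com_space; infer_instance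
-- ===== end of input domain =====

-- B replaces A's staged string passes by one char-level state-machine scan per line; objective: alternative.

-- shared helper: Python's line.rstrip('\n') — drops ALL trailing '\n' chars (exact; PySem has no chars-argument rstrip)
def pvRstripNl (cs : List Char) : List Char := (cs.reverse.dropWhile (· == '\n')).reverse

-- ===== PORT A =====
def remove_com_space (f : List String) : List String :=
  let inp_lines_as_list := f.map (fun line => String.ofList (pvRstripNl line.toList))
  let input_lines_no_space := inp_lines_as_list.map (fun line => PySem.Str.replace line " " "")
  let new_lst := (PySem.List.enumerate input_lines_no_space).foldl
    (fun acc (p : Int × String) =>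
      let val := p.2
      if PySem.Str.slice val none (some 2) = "//" then acc.set p.1.toNat ""
      else if PySem.Str.isIn "//" val then
        let ind := PySem.Str.find val "//"
        let new_val := PySem.Str.slice val none (some ind)
        acc.set p.1.toNat new_val
      else acc)
    input_lines_no_space
  new_lst.filter (fun val => val ≠ "")

-- ===== PORT B =====
-- Source B's inner char loop: skip spaces, carry the `pending`-slash flag, stop when a second
-- slash completes "//"; the result is the loop's `buf` (plus the final pending slash).
def pvScan (pending : Bool) : List Char → List Char
  | [] => if pending then ['/'] else []
  | c :: rest =>
    if c = ' ' then pvScan pending rest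
    else if c = '/' then
      (if pending then [] else pvScan true rest)
    else
      (if pending then ['/', c] else [c]) ++ pvScan false rest

def remove_com_space_alt (f : List String) : List String :=
  f.foldl (fun out line =>
    let buf := pvScan false (pvRstripNl line.toList)
    if buf ≠ [] then out ++ [String.ofList buf] else out) []

-- ===== PRECONDITION & SPEC =====
def Spec_remove_com_space (f : List String) (out : List String) : Prop := out = remove_com_space_alt f
instance (f : List String) (out : List String) : Decidable (Spec_remove_com_space f out) := by unfold Spec_remove_com_space; infer_instance

-- ===== CLAIM (what is proved, stated in full; the proofs are below) =====
def Claim_equal_remove_com_space : Prop := ∀ (f : List String), Dom_remove_com_space f → Spec_remove_com_space f (remove_com_space f)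

-- ===== LEMMAS AND PROOFS =====

lemma pvToList2 : ("//" : String).toList = ['/', '/'] := by decide

-- the per-line value A's comment-cutting loop writes at each index
def pvGA (val : String) : String :=
  if PySem.Str.slice val none (some 2) = "//" then ""
  else if PySem.Str.isIn "//" val then
    PySem.Str.slice val none (some (PySem.Str.find val "//"))
  else val

-- A's enumerate/set loop is a positional map
lemma pvLoopEq (xs pre : List String) :
    (PySem.List.enumerate xs (pre.length : Int)).foldl
      (fun acc (p : Int × String) =>
        if PySem.Str.slice p.2 none (some 2) = "//" then acc.set p.1.toNat ""
        else if PySem.Str.isIn "//" p.2 then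
          acc.set p.1.toNat (PySem.Str.slice p.2 none (some (PySem.Str.find p.2 "//")))
        else acc)
      (pre ++ xs) = pre ++ xs.map pvGA := by
  induction xs generalizing pre with
  | nil => simp
  | cons x xs ih =>
    rw [PySem.List.enumerate_cons, List.foldl_cons]
    have hset : ∀ v : String, (pre ++ x :: xs).set ((pre.length : Int)).toNat v
        = (pre ++ [v]) ++ xs := by
      intro v; simp
    have hstep : ∀ v : String, pvGA x = v →
        (PySem.List.enumerate xs ((pre.length : Int) + 1)).foldl
          (fun acc (p : Int × String) =>
            if PySem.Str.slice p.2 none (some 2) = "//" then acc.set p.1.toNat ""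
            else if PySem.Str.isIn "//" p.2 then
              acc.set p.1.toNat (PySem.Str.slice p.2 none (some (PySem.Str.find p.2 "//")))
            else acc)
          ((pre ++ [v]) ++ xs) = pre ++ (x :: xs).map pvGA := by
      intro v hv
      have h1 : ((pre.length : Int) + 1) = (((pre ++ [v]).length : Nat) : Int) := by
        simp
      rw [h1, ih (pre ++ [v])]
      simp [← hv]
    by_cases h1 : PySem.Str.slice x none (some 2) = "//"
    · rw [if_pos h1, hset]
      exact hstep "" (by unfold pvGA; rw [if_pos h1])
    · rw [if_neg h1]
      by_cases h2 : PySem.Str.isIn "//" x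
      · rw [if_pos h2, hset]
        exact hstep _ (by unfold pvGA; rw [if_neg h1, if_pos h2])
      · rw [if_neg h2]
        have hx : pre ++ x :: xs = (pre ++ [x]) ++ xs := by simp
        rw [hx]
        exact hstep x (by unfold pvGA; rw [if_neg h1, if_neg h2])

-- A's per-line value phrased on char lists
def pvGB (cs : List Char) : List Char :=
  if PySem.Chars.isIn ['/', '/'] cs then
    PySem.Chars.slice cs none (some (PySem.Chars.find cs ['/', '/']))
  else cs

-- if "//" is a prefix, its first occurrence is at index 0
lemma pvFindZero (cs : List Char) (h : ['/', '/'] <+: cs) :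
    PySem.Chars.find cs ['/', '/'] = 0 := by
  have hne : PySem.Chars.find cs ['/', '/'] ≠ -1 := fun hc =>
    ((PySem.Chars.find_eq_neg_one_iff _ _).mp hc) h.isInfix
  have hspec := PySem.Chars.findFrom_natCast_spec cs ['/', '/'] 0 (Nat.zero_le _)
  rw [Nat.cast_zero, PySem.Chars.findFrom_zero] at hspec
  obtain ⟨h0, _, hmin⟩ := hspec hne
  by_contra hne0
  have hpos : 0 < (PySem.Chars.find cs ['/', '/']).toNat := by omega
  exact hmin 0 (Nat.zero_le _) hpos (by simpa using h)

-- the per-line transforms agree (A's string version vs the char-list version)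
lemma pvPerLine (val : String) : pvGA val = String.ofList (pvGB val.toList) := by
  unfold pvGA pvGB
  by_cases h1 : PySem.Str.slice val none (some 2) = "//"
  · have htake : List.take 2 val.toList = ['/', '/'] := by
      have h := congrArg String.toList h1
      rw [PySem.Str.toList_slice] at h
      have h2 : PySem.Chars.slice val.toList none (some 2)
          = List.take (2 : Int).toNat val.toList :=
        PySem.List.slice_to val.toList (by norm_num)
      rw [h2, pvToList2] at h
      simpa using h
    have hpre : ['/', '/'] <+: val.toList := by
      rw [List.prefix_iff_eq_take]; exact htake.symm
    have hin : PySem.Chars.isIn ['/', '/'] val.toList = true :=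
      (PySem.Chars.isIn_iff_infix _ _).mpr hpre.isInfix
    rw [if_pos h1, if_pos hin, pvFindZero _ hpre]
    have h0 : PySem.Chars.slice val.toList none (some 0)
        = List.take (0 : Int).toNat val.toList :=
      PySem.List.slice_to val.toList (le_refl 0)
    rw [h0, Int.toNat_zero, List.take_zero]
  · rw [if_neg h1]
    by_cases h2 : PySem.Str.isIn "//" val
    · have hin : PySem.Chars.isIn ['/', '/'] val.toList = true := by
        have h := (PySem.Str.isIn_iff_infix "//" val).mp h2
        rw [pvToList2] at h
        exact (PySem.Chars.isIn_iff_infix _ _).mpr h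
      rw [if_pos h2, if_pos hin]
      apply String.toList_injective
      rw [PySem.Str.toList_slice, String.toList_ofList, PySem.Str.find_eq, pvToList2]
    · have hin : PySem.Chars.isIn ['/', '/'] val.toList = false := by
        rw [Bool.eq_false_iff]
        intro hc
        apply h2
        rw [PySem.Str.isIn_iff_infix, pvToList2]
        exact (PySem.Chars.isIn_iff_infix _ _).mp hc
      rw [if_neg h2, hin]
      simp

-- find points at the unique minimal occurrence
lemma pvFindUnique (s sub : List Char) (k : Nat) (hat : sub <+: s.drop k)
    (hmin : ∀ i < k, ¬ sub <+: s.drop i) : PySem.Chars.find s sub = (k : Int) := by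
  have hin : PySem.Chars.isIn sub s = true :=
    (PySem.Chars.exists_prefix_drop_iff_isIn sub s).mp ⟨k, hat⟩
  have hnn : 0 ≤ PySem.Chars.find s sub := by
    rw [PySem.Chars.find_nonneg_iff]
    exact (PySem.Chars.isIn_iff_infix _ _).mp hin
  obtain ⟨hat', hmin'⟩ := PySem.Chars.find_spec (s := s) (sub := sub) hnn
  have : (PySem.Chars.find s sub).toNat = k := by
    rcases Nat.lt_trichotomy (PySem.Chars.find s sub).toNat k with h | h | h
    · exact absurd hat' (hmin _ h)
    · exact h
    · exact absurd hat (hmin' _ h)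
  omega

-- peeling one non-comment-starting char off A's per-line value
lemma pvGB_cons (c : Char) (t : List Char) (hpre : ¬ (['/', '/'] <+: (c :: t))) :
    pvGB (c :: t) = c :: pvGB t := by
  unfold pvGB
  by_cases hin : PySem.Chars.isIn ['/', '/'] (c :: t) = true
  · have hinf : ['/', '/'] <:+: (c :: t) := (PySem.Chars.isIn_iff_infix _ _).mp hin
    have hnn : 0 ≤ PySem.Chars.find (c :: t) ['/', '/'] := by
      rw [PySem.Chars.find_nonneg_iff]; exact hinf
    obtain ⟨hat, hmin⟩ := PySem.Chars.find_spec (s := c :: t) (sub := ['/', '/']) hnn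
    set k := (PySem.Chars.find (c :: t) ['/', '/']).toNat with hk
    have hk0 : k ≠ 0 := by
      intro h0
      rw [h0] at hat
      exact hpre (by simpa using hat)
    have hdrop : ∀ i : Nat, (c :: t).drop (i + 1) = t.drop i := fun i => rfl
    have hat' : ['/', '/'] <+: t.drop (k - 1) := by
      have h1 : (c :: t).drop k = t.drop (k - 1) := by
        conv_lhs => rw [show k = (k - 1) + 1 by omega]
        exact hdrop (k - 1)
      rwa [h1] at hat
    have hmin' : ∀ i < k - 1, ¬ (['/', '/'] <+: t.drop i) := by
      intro i hi
      have := hmin (i + 1) (by omega)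
      rwa [hdrop i] at this
    have hft : PySem.Chars.find t ['/', '/'] = ((k - 1 : Nat) : Int) :=
      pvFindUnique t ['/', '/'] (k - 1) hat' hmin'
    have hint : PySem.Chars.isIn ['/', '/'] t = true :=
      (PySem.Chars.exists_prefix_drop_iff_isIn ['/', '/'] t).mp ⟨k - 1, hat'⟩
    have hfc : PySem.Chars.find (c :: t) ['/', '/'] = (k : Int) := by omega
    have hs1 : PySem.Chars.slice (c :: t) none (some (k : Int))
        = List.take ((k : Int)).toNat (c :: t) := PySem.List.slice_to _ (by positivity)
    have hs2 : PySem.Chars.slice t none (some ((k - 1 : Nat) : Int))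
        = List.take (((k - 1 : Nat) : Int)).toNat t := PySem.List.slice_to _ (by positivity)
    rw [hin, if_pos rfl, hint, if_pos rfl, hfc, hft, hs1, hs2]
    simp only [Int.toNat_natCast]
    conv_lhs => rw [show k = (k - 1) + 1 by omega]
    simp [List.take_succ_cons]
  · have hint : PySem.Chars.isIn ['/', '/'] t = false := by
      rw [Bool.eq_false_iff]
      intro h
      exact hin ((PySem.Chars.isIn_iff_infix _ _).mpr
        (((PySem.Chars.isIn_iff_infix _ _).mp h).trans (List.suffix_cons c t).isInfix))
    rw [if_neg hin, if_neg (by simp [hint])]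

-- structural truncate-at-first-"//"
def pvCut : List Char → List Char
  | [] => []
  | [c] => [c]
  | c :: d :: rest => if c = '/' ∧ d = '/' then [] else c :: pvCut (d :: rest)

lemma pvCut_cons (c : Char) (t : List Char)
    (h : ¬ (['/', '/'] <+: (c :: t))) : pvCut (c :: t) = c :: pvCut t := by
  cases t with
  | nil => rfl
  | cons d rest =>
    have hnot : ¬ (c = '/' ∧ d = '/') := by
      rintro ⟨hc, hd⟩
      subst hc; subst hd
      exact h ⟨rest, rfl⟩
    simp [pvCut, hnot]

lemma pvCut_eq_gB (ds : List Char) : pvCut ds = pvGB ds := by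
  induction ds with
  | nil => simp [pvCut, pvGB, show PySem.Chars.isIn ['/', '/'] ([] : List Char) = false by decide]
  | cons c t ih =>
    by_cases hpre : ['/', '/'] <+: (c :: t)
    · obtain ⟨u, hu⟩ := hpre
      have hct : c :: t = '/' :: '/' :: u := hu.symm
      have hin : PySem.Chars.isIn ['/', '/'] (c :: t) = true :=
        (PySem.Chars.isIn_iff_infix _ _).mpr (List.IsPrefix.isInfix ⟨u, hu⟩)
      have hfz := pvFindZero (c :: t) ⟨u, hu⟩
      rw [hct] at hin hfz ⊢
      unfold pvGB
      have hs0 : PySem.Chars.slice ('/' :: '/' :: u) none (some 0)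
          = List.take ((0 : Int)).toNat ('/' :: '/' :: u) :=
        PySem.List.slice_to _ (le_refl 0)
      rw [hin, if_pos rfl, hfz, hs0]
      simp [pvCut]
    · rw [pvCut_cons c t hpre, ih, pvGB_cons c t hpre]

-- the state machine computes "filter out spaces, then cut at the first //"
lemma pvScan_eq (cs : List Char) :
    pvScan false cs = pvCut (cs.filter (fun c => c != ' ')) ∧
    pvScan true cs = pvCut ('/' :: cs.filter (fun c => c != ' ')) := by
  induction cs with
  | nil => constructor <;> simp [pvScan, pvCut]
  | cons c rest ih =>
    by_cases hsp : c = ' '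
    · subst hsp
      constructor <;> simp [pvScan, ih.1, ih.2]
    · have hfc : List.filter (fun c => c != ' ') (c :: rest)
          = c :: List.filter (fun c => c != ' ') rest :=
        List.filter_cons_of_pos (by simp [hsp])
      by_cases hsl : c = '/'
      · subst hsl
        constructor
        · rw [hfc]
          simp only [pvScan, if_neg (by decide : ¬ ('/' : Char) = ' ')]
          simpa using ih.2
        · rw [hfc]
          simp only [pvScan, if_neg (by decide : ¬ ('/' : Char) = ' ')]
          simp [pvCut]
      · have hcut1 : pvCut (c :: rest.filter (fun c => c != ' '))
            = c :: pvCut (rest.filter (fun c => c != ' ')) := by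
          apply pvCut_cons
          rintro ⟨u, hu⟩
          injection hu with h1 _
          exact hsl h1.symm
        have hcut2 : pvCut ('/' :: c :: rest.filter (fun c => c != ' '))
            = '/' :: pvCut (c :: rest.filter (fun c => c != ' ')) := by
          apply pvCut_cons
          rintro ⟨u, hu⟩
          injection hu with _ h2
          injection h2 with h3 _
          exact hsl h3.symm
        constructor
        · rw [hfc, hcut1]
          simp only [pvScan, if_neg hsp, if_neg hsl]
          simp [ih.1]
        · rw [hfc, hcut2, hcut1]
          simp only [pvScan, if_neg hsp, if_neg hsl]
          simp [ih.1]

-- replacing ' ' by '' is filtering out spaces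
lemma pvReplaceGo (l : List Char) : ∀ (fuel : Nat) (acc : List Char), l.length ≤ fuel →
    PySem.Chars.replace.go [' '] [] fuel l acc
      = acc.reverse ++ l.filter (fun c => c != ' ') := by
  induction l with
  | nil =>
    intro fuel acc _
    cases fuel <;> simp [PySem.Chars.replace.go]
  | cons c t ih =>
    intro fuel acc hle
    cases fuel with
    | zero => simp at hle
    | succ n =>
      rw [PySem.Chars.replace.go]
      by_cases hc : c = ' '
      · subst hc
        rw [if_pos (by simp [List.isPrefixOf])]
        have hdrop : List.drop ([' '] : List Char).length (' ' :: t) = t := rfl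
        rw [hdrop]
        simp only [List.reverse_nil, List.nil_append]
        rw [ih n acc (by simpa using hle)]
        simp
      · rw [if_neg (by simp [List.isPrefixOf]; intro h; exact hc h.symm)]
        rw [ih n (c :: acc) (by simpa using hle)]
        simp [hc]

lemma pvReplaceFilter (cs : List Char) :
    PySem.Chars.replace cs [' '] [] = cs.filter (fun c => c != ' ') := by
  rw [PySem.Chars.replace, if_neg (by decide)]
  simpa using pvReplaceGo cs cs.length [] (le_refl _)

-- glue: filter commutes with a map whose image decides the same predicate
lemma pvMF {A B : Type} (g : A → B) (p : B → Bool) (q : A → Bool)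
    (h : ∀ x, p (g x) = q x) (l : List A) :
    (l.map g).filter p = (l.filter q).map g := by
  rw [List.filter_map]
  exact congrArg (List.map g) (List.filter_congr (fun x _ => h x))

-- ===== VERDICT (by name: the statement is the Claim_ definition above) =====
set_option maxHeartbeats 1000000 in
theorem remove_com_space_spec : Claim_equal_remove_com_space := by
  intro f _
  unfold Spec_remove_com_space
  have eA : remove_com_space f =
      ((PySem.List.enumerate ((f.map (fun line => String.ofList (pvRstripNl line.toList))).map
          (fun line => PySem.Str.replace line " " "")) 0).foldl
        (fun acc (p : Int × String) =>
          if PySem.Str.slice p.2 none (some 2) = "//" then acc.set p.1.toNat ""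
          else if PySem.Str.isIn "//" p.2 then
            acc.set p.1.toNat (PySem.Str.slice p.2 none (some (PySem.Str.find p.2 "//")))
          else acc)
        ((f.map (fun line => String.ofList (pvRstripNl line.toList))).map
          (fun line => PySem.Str.replace line " " ""))).filter (fun val => val ≠ "") := rfl
  have eB : remove_com_space_alt f =
      f.foldl (fun out line =>
        if pvScan false (pvRstripNl line.toList) ≠ [] then
          out ++ [String.ofList (pvScan false (pvRstripNl line.toList))]
        else out) [] := rfl
  rw [eA, eB]
  have hA := pvLoopEq ((f.map (fun line => String.ofList (pvRstripNl line.toList))).map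
      (fun line => PySem.Str.replace line " " "")) []
  simp only [List.length_nil, Nat.cast_zero, List.nil_append] at hA
  rw [hA]
  have hB := PySem.List.foldl_append_if
    (fun line => decide (pvScan false (pvRstripNl line.toList) ≠ []))
    (fun line => String.ofList (pvScan false (pvRstripNl line.toList))) f []
  simp only [decide_eq_true_eq, List.nil_append] at hB
  rw [hB]
  have hline : ∀ x : String,
      pvGA (PySem.Str.replace (String.ofList (pvRstripNl x.toList)) " " "")
        = String.ofList (pvScan false (pvRstripNl x.toList)) := by
    intro x
    rw [pvPerLine]
    refine congrArg String.ofList ?_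
    have hrepl : (PySem.Str.replace (String.ofList (pvRstripNl x.toList)) " " "").toList
        = PySem.Chars.replace (pvRstripNl x.toList) [' '] [] := by
      rw [PySem.Str.toList_replace, String.toList_ofList]
      rfl
    rw [hrepl, pvReplaceFilter, ← pvCut_eq_gB, (pvScan_eq (pvRstripNl x.toList)).1]
  have hmap : ((f.map (fun line => String.ofList (pvRstripNl line.toList))).map
        (fun line => PySem.Str.replace line " " "")).map pvGA
      = f.map (fun line => String.ofList (pvScan false (pvRstripNl line.toList))) := by
    rw [List.map_map, List.map_map]
    apply List.map_congr_left
    intro x _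
    simp only [Function.comp_apply]
    exact hline x
  rw [hmap]
  have hofnil : ∀ l : List Char, (String.ofList l = "") ↔ l = [] := by
    intro l
    constructor
    · intro h
      have := congrArg String.toList h
      rwa [String.toList_ofList] at this
    · intro h; rw [h]
  exact pvMF _ _ _ (fun x => by
    rw [decide_eq_decide]
    exact not_congr (hofnil _)) f
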